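-- pv_equiv track=rewrite | github.com/cidgoh/VIRUS-MVP | data_parser.py | get_heatmap_mutation_names
-- ===== SOURCE A (Python) =====
-- def get_heatmap_mutation_names(parsed_mutations, intra_col_mutation_pos_dict):
--     """Get mutation names associated with heatmap cells.
--
--     This is useful when allowing users to click on heatmap cells for
--     mutation details.
--
--     :param parsed_mutations: A dictionary containing multiple merged
--         ``get_parsed_gvf_dir`` return "mutations" values.
--     :type parsed_mutations: dict
--     :param intra_col_mutation_pos_dict: See
--         ``get_intra_col_mutation_pos_dict`` return value.
--     :type intra_col_mutation_pos_dict: dict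
--     :return: Mutation names for each x y coordinate in heatmap.
--     :rtype: list[list[str]]
--     """
--     ret = []
--     for strain in parsed_mutations:
--         row = []
--         for pos in intra_col_mutation_pos_dict:
--             cols = [None for _ in range(len(intra_col_mutation_pos_dict[pos]))]
--             if pos in parsed_mutations[strain]:
--                 for mutation in parsed_mutations[strain][pos]:
--                     mutation_name = mutation["mutation_name"]
--                     if mutation_name:
--                         col = intra_col_mutation_pos_dict[pos][mutation_name]
--                         cols[col] = mutation_name
--             row.extend(cols)
--         ret.append(row)
--     return ret
-- ===== SOURCE B (Python) =====
-- def get_heatmap_mutation_names(parsed_mutations, intra_col_mutation_pos_dict):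
--     # Column-layout index: starting offset of each position's segment, and total width.
--     offsets = {}
--     total = 0
--     for pos, inner in intra_col_mutation_pos_dict.items():
--         offsets[pos] = total
--         total += len(inner)
--     ret = []
--     for strain_dict in parsed_mutations.values():
--         row = [None] * total
--         for pos, mutations in strain_dict.items():
--             if pos not in offsets:
--                 continue
--             offset = offsets[pos]
--             for mutation in mutations:
--                 mutation_name = mutation["mutation_name"]
--                 if mutation_name:
--                     col = intra_col_mutation_pos_dict[pos][mutation_name]
--                     row[offset + col] = mutation_name
--         ret.append(row)
--     return ret
-- ===== Notes on version B (the rewrite author's own statement) =====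
-- stated objective: alternative
-- what changed: A builds a fresh [None]*len segment per position per strain, fills it and extends the row; B precomputes a position->offset table and the total width once, then fills one flat [None]*total row per strain by direct indexed writes, looping only over the strain's own positions.
import Mathlib
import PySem

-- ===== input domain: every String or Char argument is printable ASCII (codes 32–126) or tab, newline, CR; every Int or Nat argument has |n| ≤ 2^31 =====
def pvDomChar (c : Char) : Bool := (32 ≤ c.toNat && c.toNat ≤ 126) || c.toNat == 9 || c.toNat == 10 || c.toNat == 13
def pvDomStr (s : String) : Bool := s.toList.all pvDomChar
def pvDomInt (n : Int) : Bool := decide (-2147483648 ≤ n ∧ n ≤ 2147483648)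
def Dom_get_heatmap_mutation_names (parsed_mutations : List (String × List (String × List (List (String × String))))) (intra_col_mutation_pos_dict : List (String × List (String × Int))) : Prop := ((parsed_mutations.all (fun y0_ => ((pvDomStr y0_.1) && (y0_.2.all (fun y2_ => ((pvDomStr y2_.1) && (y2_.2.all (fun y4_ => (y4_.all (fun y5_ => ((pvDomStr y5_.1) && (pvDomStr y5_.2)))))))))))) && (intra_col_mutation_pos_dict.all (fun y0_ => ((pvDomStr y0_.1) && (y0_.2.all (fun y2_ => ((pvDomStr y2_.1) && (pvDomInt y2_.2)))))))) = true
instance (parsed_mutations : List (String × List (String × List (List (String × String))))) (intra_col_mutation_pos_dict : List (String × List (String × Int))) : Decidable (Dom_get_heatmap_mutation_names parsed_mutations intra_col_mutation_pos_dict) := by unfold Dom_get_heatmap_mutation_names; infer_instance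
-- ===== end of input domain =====

-- B replaces A's per-position segment construction (build a None-segment per position, fill it,
-- extend the row) by a precomputed offset table and one flat [None]*total row per strain filled
-- by direct indexed writes, looping only over the strain's own positions (objective: alternative).

-- ===== PORT A =====
def get_heatmap_mutation_names (parsed_mutations : List (String × List (String × List (List (String × String))))) (intra_col_mutation_pos_dict : List (String × List (String × Int))) : List (List (Option String)) :=
  parsed_mutations.foldl (fun ret sp =>
    let sd := (List.lookup sp.1 parsed_mutations).getD []
    let row := intra_col_mutation_pos_dict.foldl (fun row q =>
      let inner := (List.lookup q.1 intra_col_mutation_pos_dict).getD []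
      let cols : List (Option String) := List.replicate inner.length none
      let cols :=
        if (List.lookup q.1 sd).isSome then
          ((List.lookup q.1 sd).getD []).foldl (fun cols mu =>
            let mutation_name := (List.lookup "mutation_name" mu).getD ""
            if mutation_name ≠ "" then
              PySem.List.pySetD cols ((List.lookup mutation_name inner).getD 0) (some mutation_name)
            else cols) cols
        else cols
      row ++ cols) []
    ret ++ [row]) []

-- ===== PORT B =====
def get_heatmap_mutation_names_alt (parsed_mutations : List (String × List (String × List (List (String × String))))) (intra_col_mutation_pos_dict : List (String × List (String × Int))) : List (List (Option String)) :=
  let ot := intra_col_mutation_pos_dict.foldl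
    (fun (acc : PySem.Dict String Int × Int) q => (acc.1.insert q.1 acc.2, acc.2 + (q.2.length : Int)))
    (PySem.Dict.empty, 0)
  parsed_mutations.foldl (fun ret sp =>
    let row := sp.2.foldl (fun row pr =>
      match ot.1.get? pr.1 with
      | none => row
      | some off =>
        pr.2.foldl (fun row mu =>
          let mutation_name := (List.lookup "mutation_name" mu).getD ""
          if mutation_name ≠ "" then
            PySem.List.pySetD row (off + (List.lookup mutation_name ((List.lookup pr.1 intra_col_mutation_pos_dict).getD [])).getD 0) (some mutation_name)
          else row) row) (List.replicate ot.2.toNat (none : Option String))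
    ret ++ [row]) []

-- ===== PRECONDITION & SPEC =====
-- Pre_ restricts to the natural domain of the function: the association lists represent Python
-- dicts, so keys are unique (duplicate keys do not arise from any Python dict); every mutation
-- dict has a "mutation_name" key (A raises KeyError otherwise); every truthy mutation name occurs
-- in its position's inner dict (KeyError otherwise) with a column index 0 ≤ col < segment length
-- (in the source repository the inner dicts are built with enumerate, so indices are exactly
-- 0..len-1; out-of-range indices raise IndexError in A, and negative in-range indices would hit
-- A's Python list wraparound, outside the function's natural domain).
def Pre_get_heatmap_mutation_names (parsed_mutations : List (String × List (String × List (List (String × String))))) (intra_col_mutation_pos_dict : List (String × List (String × Int))) : Prop :=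
  (intra_col_mutation_pos_dict.map Prod.fst).Nodup ∧
  (parsed_mutations.map Prod.fst).Nodup ∧
  ∀ sp ∈ parsed_mutations, (sp.2.map Prod.fst).Nodup ∧
    ∀ q ∈ intra_col_mutation_pos_dict, ∀ mu ∈ (List.lookup q.1 sp.2).getD [],
      (List.lookup "mutation_name" mu).isSome = true ∧
      ((List.lookup "mutation_name" mu).getD "" ≠ "" →
        (List.lookup ((List.lookup "mutation_name" mu).getD "") q.2).isSome = true ∧
        0 ≤ (List.lookup ((List.lookup "mutation_name" mu).getD "") q.2).getD 0 ∧
        (List.lookup ((List.lookup "mutation_name" mu).getD "") q.2).getD 0 < (q.2.length : Int))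
instance (parsed_mutations : List (String × List (String × List (List (String × String))))) (intra_col_mutation_pos_dict : List (String × List (String × Int))) : Decidable (Pre_get_heatmap_mutation_names parsed_mutations intra_col_mutation_pos_dict) := by unfold Pre_get_heatmap_mutation_names; infer_instance

def pvWitness_get_heatmap_mutation_names : (List (String × List (String × List (List (String × String))))) × (List (String × List (String × Int))) :=
  ([("s1", [("p1", [[("mutation_name", "m1")]])])], [("p1", [("m1", 0)])])

def Spec_get_heatmap_mutation_names (parsed_mutations : List (String × List (String × List (List (String × String))))) (intra_col_mutation_pos_dict : List (String × List (String × Int))) (out : List (List (Option String))) : Prop := out = get_heatmap_mutation_names_alt parsed_mutations intra_col_mutation_pos_dict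
instance (parsed_mutations : List (String × List (String × List (List (String × String))))) (intra_col_mutation_pos_dict : List (String × List (String × Int))) (out : List (List (Option String))) : Decidable (Spec_get_heatmap_mutation_names parsed_mutations intra_col_mutation_pos_dict out) := by unfold Spec_get_heatmap_mutation_names; infer_instance

-- ===== CLAIM (what is proved, stated in full; the proofs are below) =====
def Claim_equal_get_heatmap_mutation_names : Prop := ∀ (parsed_mutations : List (String × List (String × List (List (String × String))))) (intra_col_mutation_pos_dict : List (String × List (String × Int))), Dom_get_heatmap_mutation_names parsed_mutations intra_col_mutation_pos_dict → Pre_get_heatmap_mutation_names parsed_mutations intra_col_mutation_pos_dict → Spec_get_heatmap_mutation_names parsed_mutations intra_col_mutation_pos_dict (get_heatmap_mutation_names parsed_mutations intra_col_mutation_pos_dict)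

-- ===== LEMMAS AND PROOFS =====

-- spec-level helpers
def fillSeg (inner : List (String × Int)) (ms : List (List (String × String))) (s : List (Option String)) : List (Option String) :=
  ms.foldl (fun cols mu =>
    let mutation_name := (List.lookup "mutation_name" mu).getD ""
    if mutation_name ≠ "" then
      PySem.List.pySetD cols ((List.lookup mutation_name inner).getD 0) (some mutation_name)
    else cols) s

def fillOff (icd : List (String × List (String × Int))) (pos : String) (off : Int) (ms : List (List (String × String))) (row : List (Option String)) : List (Option String) :=
  ms.foldl (fun row mu =>
    let mutation_name := (List.lookup "mutation_name" mu).getD ""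
    if mutation_name ≠ "" then
      PySem.List.pySetD row (off + (List.lookup mutation_name ((List.lookup pos icd).getD [])).getD 0) (some mutation_name)
    else row) row

def applySD (sd : List (String × List (List (String × String)))) (g : String × List (String × Int) → List (Option String)) (q : String × List (String × Int)) : List (Option String) :=
  match List.lookup q.1 sd with
  | some ms => fillSeg q.2 ms (g q)
  | none => g q

def g0 (q : String × List (String × Int)) : List (Option String) := List.replicate q.2.length none

def sumLenN (l : List (String × List (String × Int))) : Nat := (l.map (fun q => q.2.length)).sum

def otStep (acc : PySem.Dict String Int × Int) (q : String × List (String × Int)) : PySem.Dict String Int × Int :=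
  (acc.1.insert q.1 acc.2, acc.2 + (q.2.length : Int))

def condQ (q : String × List (String × Int)) (mu : List (String × String)) : Prop :=
  (List.lookup "mutation_name" mu).getD "" ≠ "" →
    0 ≤ (List.lookup ((List.lookup "mutation_name" mu).getD "") q.2).getD 0 ∧
    (List.lookup ((List.lookup "mutation_name" mu).getD "") q.2).getD 0 < (q.2.length : Int)

def rowA (sd : List (String × List (List (String × String)))) (icd : List (String × List (String × Int))) : List (Option String) :=
  icd.foldl (fun row q =>
    let inner := (List.lookup q.1 icd).getD []
    let cols : List (Option String) := List.replicate inner.length none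
    let cols :=
      if (List.lookup q.1 sd).isSome then
        ((List.lookup q.1 sd).getD []).foldl (fun cols mu =>
          let mutation_name := (List.lookup "mutation_name" mu).getD ""
          if mutation_name ≠ "" then
            PySem.List.pySetD cols ((List.lookup mutation_name inner).getD 0) (some mutation_name)
          else cols) cols
      else cols
    row ++ cols) []

def rowB (icd : List (String × List (String × Int))) (ot1 : PySem.Dict String Int) (total : Int) (sd : List (String × List (List (String × String)))) : List (Option String) :=
  sd.foldl (fun row pr =>
    match ot1.get? pr.1 with
    | none => row
    | some off => fillOff icd pr.1 off pr.2 row) (List.replicate total.toNat (none : Option String))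

-- lookup lemmas
theorem lookup_eq_none_of_not_mem {β : Type} (l : List (String × β)) (a : String) (h : a ∉ l.map Prod.fst) : List.lookup a l = none := by
  induction l with
  | nil => rfl
  | cons p t ih =>
    obtain ⟨k, b⟩ := p
    simp only [List.map_cons, List.mem_cons, not_or] at h
    have hne : (a == k) = false := by
      simp only [beq_eq_false_iff_ne, ne_eq]
      exact h.1
    rw [List.lookup_cons, hne]
    exact ih h.2

theorem lookup_append_of_not_mem {β : Type} (l1 l2 : List (String × β)) (a : String) (h : a ∉ l1.map Prod.fst) : List.lookup a (l1 ++ l2) = List.lookup a l2 := by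
  induction l1 with
  | nil => rfl
  | cons p t ih =>
    obtain ⟨k, b⟩ := p
    simp only [List.map_cons, List.mem_cons, not_or] at h
    have hne : (a == k) = false := by
      simp only [beq_eq_false_iff_ne, ne_eq]
      exact h.1
    rw [List.cons_append, List.lookup_cons, hne]
    exact ih h.2

theorem lookup_self_of_nodup {β : Type} (l : List (String × β)) (p : String × β) (hmem : p ∈ l) (hn : (l.map Prod.fst).Nodup) : List.lookup p.1 l = some p.2 := by
  induction l with
  | nil => cases hmem
  | cons q t ih =>
    obtain ⟨k, b⟩ := q
    simp only [List.map_cons, List.nodup_cons] at hn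
    rcases List.mem_cons.mp hmem with h | h
    · subst h
      rw [List.lookup_cons]
      simp
    · have hne : (p.1 == k) = false := by
        simp only [beq_eq_false_iff_ne, ne_eq]
        intro hh
        exact hn.1 (hh ▸ List.mem_map_of_mem (f := Prod.fst) h)
      rw [List.lookup_cons, hne]
      exact ih h hn.2

-- pySetD lemmas
theorem pySetD_eq_set {α : Type} (xs : List α) (i : Int) (v : α) (h0 : 0 ≤ i) (h1 : i < xs.length) : PySem.List.pySetD xs i v = xs.set i.toNat v := by
  unfold PySem.List.pySetD PySem.List.pySet? PySem.List.pyIdx?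
  rw [if_pos h0, if_pos h1]
  rfl

theorem pySetD_append3 {α : Type} (X s Y : List α) (c : Int) (v : α) (h0 : 0 ≤ c) (h1 : c < s.length) :
    PySem.List.pySetD (X ++ s ++ Y) ((X.length : Int) + c) v = X ++ PySem.List.pySetD s c v ++ Y := by
  rw [pySetD_eq_set, pySetD_eq_set _ _ _ h0 h1]
  · rw [Int.toNat_add (by positivity) h0]
    simp only [Int.toNat_natCast]
    rw [List.append_assoc, List.set_append, if_neg (by omega), List.set_append,
      if_pos (by omega), Nat.add_sub_cancel_left, List.append_assoc]
  · omega
  · simp only [List.length_append]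
    push_cast
    omega

theorem length_fillSeg (inner : List (String × Int)) (ms : List (List (String × String))) (s : List (Option String)) : (fillSeg inner ms s).length = s.length := by
  induction ms generalizing s with
  | nil => rfl
  | cons mu t ih =>
    show (fillSeg inner t _).length = _
    rw [ih]
    dsimp only
    split
    · rw [PySem.List.length_pySetD]
    · rfl

theorem fillOff_split (icd : List (String × List (String × Int))) (pos : String) (inner : List (String × Int))
    (hinner : (List.lookup pos icd).getD [] = inner)
    (ms : List (List (String × String))) (X s Y : List (Option String))
    (hc : ∀ mu ∈ ms, (List.lookup "mutation_name" mu).getD "" ≠ "" →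
       0 ≤ (List.lookup ((List.lookup "mutation_name" mu).getD "") inner).getD 0 ∧
       (List.lookup ((List.lookup "mutation_name" mu).getD "") inner).getD 0 < (s.length : Int)) :
    fillOff icd pos (X.length : Int) ms (X ++ s ++ Y) = X ++ fillSeg inner ms s ++ Y := by
  induction ms generalizing s with
  | nil => rfl
  | cons mu t ih =>
    show fillOff icd pos _ t _ = X ++ fillSeg inner t _ ++ Y
    rw [hinner]
    dsimp only
    by_cases hname : (List.lookup "mutation_name" mu).getD "" ≠ ""
    · obtain ⟨hlo, hhi⟩ := hc mu (List.mem_cons_self ..) hname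
      rw [if_pos hname, if_pos hname, pySetD_append3 _ _ _ _ _ hlo hhi]
      exact ih _ (fun mu' hmu' h => by
        have := hc mu' (List.mem_cons_of_mem _ hmu') h
        rwa [PySem.List.length_pySetD])
    · rw [if_neg hname, if_neg hname]
      exact ih s (fun mu' hmu' h => hc mu' (List.mem_cons_of_mem _ hmu') h)

-- offsets-table lemmas
theorem ot_snd (icd : List (String × List (String × Int))) (d : PySem.Dict String Int) (t : Int) :
    (icd.foldl otStep (d, t)).2 = t + (sumLenN icd : Int) := by
  induction icd generalizing d t with
  | nil => simp [sumLenN]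
  | cons q r ih =>
    rw [List.foldl_cons, ih]
    simp only [otStep, sumLenN, List.map_cons, List.sum_cons]
    push_cast
    ring

theorem ot_get_of_not_mem (icd : List (String × List (String × Int))) (d : PySem.Dict String Int) (t : Int) (k : String) (h : k ∉ icd.map Prod.fst) :
    (icd.foldl otStep (d, t)).1.get? k = d.get? k := by
  induction icd generalizing d t with
  | nil => rfl
  | cons q r ih =>
    simp only [List.map_cons, List.mem_cons, not_or] at h
    rw [List.foldl_cons, ih _ _ h.2]
    exact PySem.Dict.get?_insert_of_ne (hne := h.1) ..

theorem ot_get_split (L1 L2 : List (String × List (String × Int))) (q : String × List (String × Int)) (d : PySem.Dict String Int) (t : Int)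
    (h2 : q.1 ∉ L2.map Prod.fst) :
    (((L1 ++ q :: L2).foldl otStep (d, t))).1.get? q.1 = some (t + (sumLenN L1 : Int)) := by
  rw [List.foldl_append, List.foldl_cons]
  rw [ot_get_of_not_mem _ _ _ _ h2]
  have hsnd := ot_snd L1 d t
  show ((L1.foldl otStep (d, t)).1.insert q.1 (L1.foldl otStep (d, t)).2).get? q.1 = _
  rw [PySem.Dict.get?_insert_self, hsnd]

theorem flatten_g0 (icd : List (String × List (String × Int))) :
    (icd.map g0).flatten = List.replicate (sumLenN icd) (none : Option String) := by
  induction icd with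
  | nil => rfl
  | cons q r ih =>
    simp only [List.map_cons, List.flatten_cons, ih, sumLenN, List.sum_cons, g0]
    rw [List.replicate_add]

-- B's per-strain fold equals the per-position spec
theorem B_rows (icd : List (String × List (String × Int))) (hic : (icd.map Prod.fst).Nodup)
    (sd : List (String × List (List (String × String)))) (hsd : (sd.map Prod.fst).Nodup)
    (hc : ∀ q ∈ icd, ∀ mu ∈ (List.lookup q.1 sd).getD [], condQ q mu)
    (g : String × List (String × Int) → List (Option String)) (hg : ∀ q ∈ icd, (g q).length = q.2.length) :
    sd.foldl (fun row pr =>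
      match (icd.foldl otStep (PySem.Dict.empty, 0)).1.get? pr.1 with
      | none => row
      | some off => fillOff icd pr.1 off pr.2 row) ((icd.map g).flatten)
    = (icd.map (applySD sd g)).flatten := by
  induction sd generalizing g with
  | nil =>
    simp only [List.foldl_nil]
    exact (congrArg List.flatten
      (List.map_congr_left (fun q _ => (rfl : applySD [] g q = g q)))).symm
  | cons pr rest ih =>
    obtain ⟨p, ms⟩ := pr
    simp only [List.map_cons, List.nodup_cons] at hsd
    rw [List.foldl_cons]
    by_cases hp : p ∈ icd.map Prod.fst
    · -- p names a column position: its write lands in that position's segment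
      obtain ⟨q0, hq0mem, hq0fst⟩ := List.mem_map.mp hp
      obtain ⟨L1, L2, hicd⟩ := List.append_of_mem hq0mem
      subst hicd
      have hkeys := hic
      simp only [List.map_append, List.map_cons, List.nodup_append, List.nodup_cons] at hkeys
      have hpL1 : p ∉ L1.map Prod.fst := fun hmem =>
        (hkeys.2.2 p hmem q0.1 (List.mem_cons_self ..)) hq0fst.symm
      have hpL2 : p ∉ L2.map Prod.fst := by
        rw [← hq0fst]
        exact hkeys.2.1.1
      have hot : ((L1 ++ q0 :: L2).foldl otStep (PySem.Dict.empty, 0)).1.get? p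
          = some ((sumLenN L1 : Int)) := by
        have := ot_get_split L1 L2 q0 PySem.Dict.empty 0 hkeys.2.1.1
        rw [hq0fst] at this
        rw [this, zero_add]
      dsimp only
      rw [hot]
      dsimp only
      have hflat : ((L1 ++ q0 :: L2).map g).flatten
          = (L1.map g).flatten ++ (g q0 ++ (L2.map g).flatten) := by
        simp [List.map_append, List.flatten_append]
      have hXlen : (((L1.map g).flatten).length : Int) = (sumLenN L1 : Int) := by
        congr 1
        simp only [List.length_flatten, sumLenN, List.map_map]
        congr 1
        apply List.map_congr_left
        intro q hq
        exact hg q (List.mem_append_left _ hq)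
      have hinner : (List.lookup p (L1 ++ q0 :: L2)).getD [] = q0.2 := by
        rw [lookup_append_of_not_mem _ _ _ hpL1, List.lookup_cons]
        have : (p == q0.1) = true := by simp [hq0fst]
        rw [this]
        rfl
      have hcq0 := hc q0 (List.mem_append_right _ (List.mem_cons_self ..))
      have hq0look : (List.lookup q0.1 ((p, ms) :: rest)).getD [] = ms := by
        rw [List.lookup_cons]
        have : (q0.1 == p) = true := by simp [hq0fst]
        rw [this]
        rfl
      rw [hq0look] at hcq0
      have hstep : fillOff (L1 ++ q0 :: L2) p ((sumLenN L1 : Int)) ms (((L1 ++ q0 :: L2).map g).flatten)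
          = ((L1 ++ q0 :: L2).map (fun q => if q.1 = p then fillSeg q.2 ms (g q) else g q)).flatten := by
        rw [hflat, ← List.append_assoc, ← hXlen,
          fillOff_split _ _ _ hinner _ _ _ _ (fun mu hmu hname => by
            have := (hcq0 mu hmu) hname
            rwa [hg q0 hq0mem])]
        simp only [List.map_append, List.map_cons, List.flatten_append, List.flatten_cons]
        rw [List.append_assoc]
        congr 1
        · congr 1
          apply List.map_congr_left
          intro q hq
          rw [if_neg (fun hqp => hpL1 (by rw [← hqp]; exact List.mem_map_of_mem (f := Prod.fst) hq))]
        congr 1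
        · rw [if_pos hq0fst]
        congr 1
        apply List.map_congr_left
        intro q hq
        rw [if_neg (fun hqp => hpL2 (by rw [← hqp]; exact List.mem_map_of_mem (f := Prod.fst) hq))]
      rw [hstep]
      rw [ih hsd.2 (fun q hq mu hmu => by
          by_cases hqp : q.1 = p
          · rw [lookup_eq_none_of_not_mem _ _ (by rw [hqp]; exact hsd.1)] at hmu
            cases hmu
          · have := hc q hq mu
            rw [List.lookup_cons] at this
            have hne : (q.1 == p) = false := by simp [hqp]
            rw [hne] at this
            exact this hmu)
        (fun q => if q.1 = p then fillSeg q.2 ms (g q) else g q)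
        (fun q hq => by
          dsimp only
          split
          · rw [length_fillSeg]
            exact hg q hq
          · exact hg q hq)]
      congr 1
      apply List.map_congr_left
      intro q hq
      by_cases hqp : q.1 = p
      · simp only [applySD]
        rw [lookup_eq_none_of_not_mem _ _ (by rw [hqp]; exact hsd.1)]
        rw [List.lookup_cons]
        have : (q.1 == p) = true := by simp [hqp]
        rw [this]
        dsimp only
        rw [if_pos hqp]
      · simp only [applySD]
        rw [List.lookup_cons]
        have hne : (q.1 == p) = false := by simp [hqp]
        rw [hne]
        cases List.lookup q.1 rest with
        | none =>
          dsimp only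
          rw [if_neg hqp]
        | some ms' =>
          dsimp only
          rw [if_neg hqp]
    · -- p is not a column position: the write is skipped
      have hot : (icd.foldl otStep (PySem.Dict.empty, 0)).1.get? p = none := by
        rw [ot_get_of_not_mem _ _ _ _ hp]
        rfl
      dsimp only
      rw [hot]
      dsimp only
      rw [ih hsd.2 (fun q hq mu hmu => by
          have hqp : q.1 ≠ p := fun hqp => hp (by rw [← hqp]; exact List.mem_map_of_mem (f := Prod.fst) hq)
          have := hc q hq mu
          rw [List.lookup_cons] at this
          have hne : (q.1 == p) = false := by simp [hqp]
          rw [hne] at this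
          exact this hmu) g hg]
      congr 1
      apply List.map_congr_left
      intro q hq
      have hqp : q.1 ≠ p := fun hqp => hp (by rw [← hqp]; exact List.mem_map_of_mem (f := Prod.fst) hq)
      simp only [applySD]
      rw [List.lookup_cons]
      have hne : (q.1 == p) = false := by simp [hqp]
      rw [hne]

-- A's per-strain row equals the per-position spec
theorem rowA_eq (icd : List (String × List (String × Int))) (hic : (icd.map Prod.fst).Nodup)
    (sd : List (String × List (List (String × String)))) :
    rowA sd icd = (icd.map (applySD sd g0)).flatten := by
  unfold rowA
  refine Eq.trans (PySem.List.foldl_congr_mem _ _ (fun row q => row ++ applySD sd g0 q) _ ?_) ?_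
  · intro row q hq
    dsimp only
    rw [lookup_self_of_nodup icd q hq hic]
    dsimp only [Option.getD_some]
    cases hs : List.lookup q.1 sd with
    | none =>
      rw [if_neg (by simp)]
      simp [applySD, hs, g0]
    | some ms =>
      rw [if_pos (by simp)]
      simp only [applySD, hs, g0, Option.getD_some]
      rfl
  · rw [PySem.List.foldl_append_eq_flatMap, List.flatMap_def]
    rfl

theorem strain_eq (icd : List (String × List (String × Int))) (hic : (icd.map Prod.fst).Nodup)
    (sd : List (String × List (List (String × String)))) (hsd : (sd.map Prod.fst).Nodup)
    (hc : ∀ q ∈ icd, ∀ mu ∈ (List.lookup q.1 sd).getD [], condQ q mu) :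
    rowA sd icd = rowB icd (icd.foldl otStep (PySem.Dict.empty, 0)).1 (icd.foldl otStep (PySem.Dict.empty, 0)).2 sd := by
  unfold rowB
  have h2 : (icd.foldl otStep (PySem.Dict.empty, 0)).2.toNat = sumLenN icd := by
    rw [ot_snd]
    simp
  rw [h2, ← flatten_g0]
  rw [B_rows icd hic sd hsd hc g0 (fun q hq => by simp [g0])]
  exact rowA_eq icd hic sd

theorem A_as_map (pm : List (String × List (String × List (List (String × String))))) (icd : List (String × List (String × Int))) :
    get_heatmap_mutation_names pm icd = pm.map (fun sp => rowA ((List.lookup sp.1 pm).getD []) icd) := by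
  show pm.foldl (fun ret sp => ret ++ [rowA ((List.lookup sp.1 pm).getD []) icd]) [] = _
  rw [PySem.List.foldl_append_singleton_eq_map (fun sp => rowA ((List.lookup sp.1 pm).getD []) icd) pm []]
  rfl

theorem B_as_map (pm : List (String × List (String × List (List (String × String))))) (icd : List (String × List (String × Int))) :
    get_heatmap_mutation_names_alt pm icd = pm.map (fun sp => rowB icd (icd.foldl otStep (PySem.Dict.empty, 0)).1 (icd.foldl otStep (PySem.Dict.empty, 0)).2 sp.2) := by
  show pm.foldl (fun ret sp => ret ++ [rowB icd (icd.foldl otStep (PySem.Dict.empty, 0)).1 (icd.foldl otStep (PySem.Dict.empty, 0)).2 sp.2]) [] = _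
  rw [PySem.List.foldl_append_singleton_eq_map (fun sp => rowB icd (icd.foldl otStep (PySem.Dict.empty, 0)).1 (icd.foldl otStep (PySem.Dict.empty, 0)).2 sp.2) pm []]
  rfl

-- ===== VERDICT (by name: the statement is the Claim_ definition above) =====
theorem get_heatmap_mutation_names_spec : Claim_equal_get_heatmap_mutation_names := by
  intro pm icd _hdom hpre
  unfold Spec_get_heatmap_mutation_names
  obtain ⟨hic, hpm, hsp⟩ := hpre
  rw [A_as_map, B_as_map]
  apply List.map_congr_left
  intro sp hmem
  rw [lookup_self_of_nodup pm sp hmem hpm]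
  exact strain_eq icd hic sp.2 (hsp sp hmem).1
    (fun q hq mu hmu => by
      intro h
      exact (((hsp sp hmem).2 q hq mu hmu).2 h).2)
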